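-- pv_equiv track=rewrite | github.com/zidaneelfasya/GA-logisticrouteheuristic | newmain.py | pisahkan_rute
-- ===== SOURCE A (Python) =====
-- permintaan = {'TEH': 50, 'GP': 60, 'TPE': 70, 'ECT': 80, 'TUCR': 55, 'SSK': 65,
--               'ECR': 45, 'EC': 90, 'SEJ': 50, 'SE': 40}
--
-- kapasitas_truk = 271  # Kapasitas truk
--
-- def pisahkan_rute(rute):
--     rute_terpisah = []
--     rute_sementara = ['DC']
--     kapasitas_sisa = kapasitas_truk
--
--     for toko in rute:
--         if permintaan[toko] <= kapasitas_sisa: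
--             rute_sementara.append(toko)
--             kapasitas_sisa -= permintaan[toko]
--         else:
--             rute_sementara.append('DC')
--             rute_terpisah.append(rute_sementara)
--             rute_sementara = ['DC', toko]
--             kapasitas_sisa = kapasitas_truk - permintaan[toko]
--
--     rute_sementara.append('DC')
--     rute_terpisah.append(rute_sementara)
--     return rute_terpisah
-- ===== SOURCE B (Python) =====
-- permintaan = {'TEH': 50, 'GP': 60, 'TPE': 70, 'ECT': 80, 'TUCR': 55, 'SSK': 65,
--               'ECR': 45, 'EC': 90, 'SEJ': 50, 'SE': 40}
--
-- kapasitas_truk = 271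
--
--
-- def _muat(rute, sisa):
--     # how many stores of `rute` (a lookahead) still fit in the remaining capacity `sisa`
--     n = 0
--     for toko in rute:
--         d = permintaan[toko]
--         if d > sisa:
--             break
--         sisa -= d
--         n += 1
--     return n
--
--
-- def pisahkan_rute(rute):
--     # chunk-at-a-time: repeatedly measure the longest feasible prefix and slice it off
--     hasil = []
--     sisa = list(rute)
--     while sisa:
--         i = _muat(sisa[1:], kapasitas_truk - permintaan[sisa[0]])
--         hasil.append(['DC'] + sisa[:i + 1] + ['DC'])
--         sisa = sisa[i + 1:]
--     return hasil or [['DC', 'DC']]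
-- ===== Notes on version B (the rewrite author's own statement) =====
-- stated objective: alternative
-- what changed: B works chunk-at-a-time: a lookahead helper measures how many stores of the remaining route still fit the truck, the whole subroute is built and sliced off at once, and the route loop never threads a partial subroute or remaining capacity across iterations; Pre_ excludes routes naming a store absent from permintaan, where both A and B raise KeyError.
import Mathlib
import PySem

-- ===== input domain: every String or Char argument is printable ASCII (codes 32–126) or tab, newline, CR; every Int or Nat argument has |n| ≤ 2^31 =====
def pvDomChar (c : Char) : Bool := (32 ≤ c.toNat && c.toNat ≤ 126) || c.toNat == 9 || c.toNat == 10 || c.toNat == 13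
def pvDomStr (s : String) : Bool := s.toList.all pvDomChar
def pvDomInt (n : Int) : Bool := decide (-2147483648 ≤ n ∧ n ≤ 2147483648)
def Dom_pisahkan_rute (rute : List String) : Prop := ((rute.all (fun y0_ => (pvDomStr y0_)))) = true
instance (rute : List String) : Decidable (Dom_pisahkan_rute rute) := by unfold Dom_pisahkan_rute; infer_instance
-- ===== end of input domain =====

-- B slices the route one whole truck-chunk at a time via a lookahead fit counter,
-- instead of A's store-by-store loop threading a partial subroute and remaining capacity.

def permintaan : PySem.Dict String Int :=
  PySem.Dict.ofList [("TEH", 50), ("GP", 60), ("TPE", 70), ("ECT", 80), ("TUCR", 55),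
    ("SSK", 65), ("ECR", 45), ("EC", 90), ("SEJ", 50), ("SE", 40)]

def kapasitas_truk : Int := 271

-- permintaan[toko]; KeyError (key absent) is excluded by Pre_, the default is never reached there
def pvDemand (toko : String) : Int := (permintaan.get? toko).getD 0

-- ===== PORT A =====
-- loop body of A: state (rute_terpisah, rute_sementara, kapasitas_sisa)
def pvStepA (st : List (List String) × List String × Int) (toko : String) :
    List (List String) × List String × Int :=
  let (terpisah, sementara, sisa) := st
  if pvDemand toko ≤ sisa then
    (terpisah, sementara ++ [toko], sisa - pvDemand toko)
  else
    (terpisah ++ [sementara ++ ["DC"]], ["DC", toko], kapasitas_truk - pvDemand toko)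

def pisahkan_rute (rute : List String) : List (List String) :=
  let st := rute.foldl pvStepA ([], ["DC"], kapasitas_truk)
  st.1 ++ [st.2.1 ++ ["DC"]]

-- ===== PORT B =====
-- _muat: how many stores of the lookahead still fit in the remaining capacity
def pvMuat : List String → Int → Nat
  | [], _ => 0
  | toko :: rest, sisa =>
    if pvDemand toko > sisa then 0 else pvMuat rest (sisa - pvDemand toko) + 1

-- the while loop of B, with `hasil` as the accumulator
def pvLoop (hasil : List (List String)) (sisa : List String) : List (List String) :=
  match sisa with
  | [] => hasil
  | toko :: rest =>
    let i := pvMuat rest (kapasitas_truk - pvDemand toko)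
    pvLoop (hasil ++ [["DC"] ++ (toko :: rest.take i) ++ ["DC"]]) (rest.drop i)
termination_by sisa.length
decreasing_by simp

def pisahkan_rute_alt (rute : List String) : List (List String) :=
  let hasil := pvLoop [] rute
  if hasil = [] then [["DC", "DC"]] else hasil

-- ===== PRECONDITION & SPEC =====
-- Pre_ excludes exactly the routes naming a store absent from permintaan, where A (and B) raise KeyError.
def Pre_pisahkan_rute (rute : List String) : Prop :=
  (rute.all (fun toko => permintaan.contains toko)) = true
instance (rute : List String) : Decidable (Pre_pisahkan_rute rute) := by
  unfold Pre_pisahkan_rute; infer_instance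
def pvWitness_pisahkan_rute : List String := ["EC", "EC", "EC", "EC", "SE"]

def Spec_pisahkan_rute (rute : List String) (out : List (List String)) : Prop := out = pisahkan_rute_alt rute
instance (rute : List String) (out : List (List String)) : Decidable (Spec_pisahkan_rute rute out) := by unfold Spec_pisahkan_rute; infer_instance

-- ===== CLAIM (what is proved, stated in full; the proofs are below) =====
def Claim_equal_pisahkan_rute : Prop := ∀ (rute : List String), Dom_pisahkan_rute rute → Pre_pisahkan_rute rute → Spec_pisahkan_rute rute (pisahkan_rute rute)

-- ===== LEMMAS AND PROOFS =====

-- proof-side intermediate: A's chunking written as recursion over the route with the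
-- current bare group C and remaining capacity k threaded through
def pvChunksFrom (C : List String) (k : Int) : List String → List (List String)
  | [] => [C]
  | toko :: rest =>
    if pvDemand toko ≤ k then pvChunksFrom (C ++ [toko]) (k - pvDemand toko) rest
    else C :: pvChunksFrom [toko] (kapasitas_truk - pvDemand toko) rest

def pvWrap (g : List String) : List String := "DC" :: (g ++ ["DC"])

theorem pvDemand_le (toko : String) : pvDemand toko ≤ kapasitas_truk := by
  unfold pvDemand
  cases h : permintaan.get? toko with
  | none => simp [kapasitas_truk]
  | some v =>
    have hm := PySem.Dict.mem_items_of_get?_eq_some permintaan h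
    have hit : permintaan.items = [("TEH", 50), ("GP", 60), ("TPE", 70), ("ECT", 80),
        ("TUCR", 55), ("SSK", 65), ("ECR", 45), ("EC", 90), ("SEJ", 50), ("SE", 40)] := by rfl
    rw [hit] at hm
    simp only [List.mem_cons, List.not_mem_nil, or_false, Prod.mk.injEq] at hm
    rcases hm with ⟨_, rfl⟩|⟨_, rfl⟩|⟨_, rfl⟩|⟨_, rfl⟩|⟨_, rfl⟩|⟨_, rfl⟩|⟨_, rfl⟩|⟨_, rfl⟩|⟨_, rfl⟩|⟨_, rfl⟩ <;>
      simp [kapasitas_truk]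

-- A's fold equals the chunk recursion, each chunk wrapped with the depot
theorem pv_foldA_chunks (rute : List String) :
    ∀ (T : List (List String)) (C : List String) (k : Int),
      (let st := rute.foldl pvStepA (T, "DC" :: C, k); st.1 ++ [st.2.1 ++ ["DC"]]) =
        T ++ (pvChunksFrom C k rute).map pvWrap := by
  induction rute with
  | nil => intro T C k; simp [pvChunksFrom, pvWrap]
  | cons toko rest ih =>
    intro T C k
    by_cases h : pvDemand toko ≤ k
    · have := ih T (C ++ [toko]) (k - pvDemand toko)
      simpa [List.foldl, pvStepA, pvChunksFrom, h] using this
    · have := ih (T ++ [pvWrap C]) [toko] (kapasitas_truk - pvDemand toko)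
      simp only [List.foldl, pvStepA, pvChunksFrom, h] at this ⊢
      simpa [pvWrap, List.append_assoc] using this

-- B's while loop consumes exactly one chunk per iteration
theorem pv_loop_chunks (rute : List String) :
    ∀ (C : List String) (k : Int) (hasil : List (List String)),
      pvLoop (hasil ++ [pvWrap (C ++ rute.take (pvMuat rute k))]) (rute.drop (pvMuat rute k)) =
        hasil ++ (pvChunksFrom C k rute).map pvWrap := by
  induction rute with
  | nil =>
    intro C k hasil
    rw [pvLoop.eq_def]
    simp [pvMuat, pvChunksFrom]
  | cons toko rest ih =>
    intro C k hasil
    by_cases h : pvDemand toko ≤ k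
    · have hmu : pvMuat (toko :: rest) k = pvMuat rest (k - pvDemand toko) + 1 := by
        simp [pvMuat, not_lt.mpr h]
      rw [hmu]
      have := ih (C ++ [toko]) (k - pvDemand toko) hasil
      simpa [pvChunksFrom, h, List.take_succ_cons, List.drop_succ_cons,
        List.append_assoc] using this
    · have hmu : pvMuat (toko :: rest) k = 0 := by
        simp [pvMuat, not_le.mp h]
      rw [hmu]
      simp only [List.take_zero, List.drop_zero, List.append_nil]
      rw [pvLoop.eq_def]
      have := ih [toko] (kapasitas_truk - pvDemand toko) (hasil ++ [pvWrap C])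
      simp only [pvChunksFrom, if_neg h, List.map_cons, pvWrap] at this ⊢
      simpa [List.append_assoc] using this

theorem pvChunksFrom_ne_nil (l : List String) :
    ∀ (C : List String) (k : Int), pvChunksFrom C k l ≠ [] := by
  induction l with
  | nil => intro C k; simp [pvChunksFrom]
  | cons toko rest ih =>
    intro C k
    by_cases h : pvDemand toko ≤ k <;> simp [pvChunksFrom, h, ih]

theorem pv_alt_chunks (rute : List String) :
    pisahkan_rute_alt rute = (pvChunksFrom [] kapasitas_truk rute).map pvWrap := by
  cases rute with
  | nil =>
    unfold pisahkan_rute_alt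
    rw [pvLoop.eq_def]
    simp [pvChunksFrom, pvWrap]
  | cons toko rest =>
    unfold pisahkan_rute_alt
    rw [pvLoop.eq_def]
    have hfit : pvDemand toko ≤ kapasitas_truk := pvDemand_le toko
    have h := pv_loop_chunks rest [toko] (kapasitas_truk - pvDemand toko) []
    simp only [List.nil_append, pvWrap, List.cons_append] at h ⊢
    rw [h, if_neg (by simp [pvChunksFrom_ne_nil])]
    simp [pvChunksFrom, hfit]

-- ===== VERDICT (by name: the statement is the Claim_ definition above) =====
theorem pisahkan_rute_spec : Claim_equal_pisahkan_rute := by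
  intro rute _ _
  unfold Spec_pisahkan_rute pisahkan_rute
  rw [pv_alt_chunks]
  simpa using pv_foldA_chunks rute [] [] kapasitas_truk
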